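-- pv_equiv track=rewrite | github.com/Edmynx/Hobby | storage_fitting.py | fit_max_objects
-- ===== SOURCE A (Python) =====
-- def fit_max_objects(storage, objects):
--     count = 0
--
--     # observation: if the objects are sorted, then small sized objects can be pushed
--     # first as those have a better chance of going through constraints than bigger
--     # sized objects. Precisely put, whatever constraint an object cannot go through,
--     # a number greater than it will not stand a chance of going through either.
--     # More precisely put, if any object stand a chance of filling memories at the
--     # far right of the one-dimensional storage segments, then they are small sized
--     # objects. The algorithm thus fill those first and keep track of the last memory
--     # segment used, which is affected by the last storage segment that a relatively
--     # small sized object could go through/fit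
--     sorted_objects = sorted(objects)
--
--     last_i = len(storage)  # last memory segment used
--     for obj in sorted_objects:  # try fitting every object
--         i = 0
--
--         # make sure that the object can go through (or fit) the current storage segment
--         # and that it is not stored in or past the last memory segment used
--         while i < last_i and obj <= storage[i]:
--             i += 1
--         if i > 0:
--             count += 1
--         last_i = i - 1
--
--     return count
-- ===== SOURCE B (Python) =====
-- def fit_max_objects(storage, objects):
--     # Prefix minima of storage + a monotone pointer over the sorted objects:
--     # storage is scanned once in total instead of once per object.
--     pm = []
--     m = None
--     for x in storage:
--         m = x if m is None or x < m else m
--         pm.append(m)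
--     count = 0
--     last_i = len(storage)
--     p = len(storage)  # leading run of pm entries >= current object; only shrinks
--     for obj in sorted(objects):
--         while p > 0 and pm[p - 1] < obj:
--             p -= 1
--         i = p if p < last_i else (last_i if last_i > 0 else 0)
--         if i > 0:
--             count += 1
--         last_i = i - 1
--     return count
-- ===== Notes on version B (the rewrite author's own statement) =====
-- stated objective: faster
-- what changed: Replaces A's per-object rescan of storage from index 0 with precomputed prefix minima and a single monotonically shrinking pointer over the sorted objects, so storage is traversed once in total.
import Mathlib
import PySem

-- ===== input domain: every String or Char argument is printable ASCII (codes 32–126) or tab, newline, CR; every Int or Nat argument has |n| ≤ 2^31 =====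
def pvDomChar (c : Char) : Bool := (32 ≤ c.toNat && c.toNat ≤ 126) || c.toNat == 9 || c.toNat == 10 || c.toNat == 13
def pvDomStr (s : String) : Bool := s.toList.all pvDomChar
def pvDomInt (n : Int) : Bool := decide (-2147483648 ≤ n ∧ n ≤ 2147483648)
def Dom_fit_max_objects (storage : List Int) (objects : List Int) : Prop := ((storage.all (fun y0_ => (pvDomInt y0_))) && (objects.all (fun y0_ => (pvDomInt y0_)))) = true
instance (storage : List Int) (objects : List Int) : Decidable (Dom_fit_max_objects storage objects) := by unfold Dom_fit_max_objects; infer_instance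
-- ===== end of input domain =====

-- B replaces A's per-object rescan of storage by prefix minima plus one shrinking
-- pointer over the sorted objects (storage scanned once in total); return values agree.

-- ===== PORT A =====
-- inner `while i < last_i and obj <= storage[i]: i += 1` of A; the index access is
-- always in range when last_i ≤ len(storage) (A's invariant), so `.getD 0` is never
-- the result of an out-of-range access on reachable states.
def pvAWhile (storage : List Int) (obj : Int) (last_i : Int) (i : Nat) : Nat :=
  if h : (i : Int) < last_i ∧ obj ≤ ((PySem.List.pyGet? storage (i : Int)).getD 0) then
    pvAWhile storage obj last_i (i + 1)
  else i
termination_by (last_i - (i : Int)).toNat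
decreasing_by omega

def fit_max_objects (storage : List Int) (objects : List Int) : Int :=
  let sorted_objects := PySem.List.sorted objects (fun x => x) false
  (sorted_objects.foldl
    (fun (st : Int × Int) obj =>
      let i := pvAWhile storage obj st.2 0
      (st.1 + (if (i : Int) > 0 then 1 else 0), (i : Int) - 1))
    ((0 : Int), (storage.length : Int))).1

-- ===== PORT B =====
-- prefix minima: m = x if m is None or x < m else m; pm.append(m)
def pvPmAux (m : Option Int) (s : List Int) : List Int :=
  match s with
  | [] => []
  | x :: t =>
      let m' := match m with
        | none => x
        | some mm => if x < mm then x else mm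
      m' :: pvPmAux (some m') t

-- inner `while p > 0 and pm[p-1] < obj: p -= 1` of B
def pvBWhile (pm : List Int) (obj : Int) (p : Nat) : Nat :=
  if h : 0 < p ∧ ((PySem.List.pyGet? pm ((p : Int) - 1)).getD 0) < obj then
    pvBWhile pm obj (p - 1)
  else p
termination_by p
decreasing_by omega

def fit_max_objects_alt (storage : List Int) (objects : List Int) : Int :=
  let pm := pvPmAux none storage
  (((PySem.List.sorted objects (fun x => x) false).foldl
    (fun (st : Int × Int × Nat) obj =>
      let p := pvBWhile pm obj st.2.2
      let i : Int := if (p : Int) < st.2.1 then (p : Int) else if st.2.1 > 0 then st.2.1 else 0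
      (st.1 + (if i > 0 then 1 else 0), i - 1, p))
    ((0 : Int), (storage.length : Int), storage.length)).1)

-- ===== PRECONDITION & SPEC =====
def Spec_fit_max_objects (storage : List Int) (objects : List Int) (out : Int) : Prop := out = fit_max_objects_alt storage objects
instance (storage : List Int) (objects : List Int) (out : Int) : Decidable (Spec_fit_max_objects storage objects out) := by unfold Spec_fit_max_objects; infer_instance

-- ===== CLAIM (what is proved, stated in full; the proofs are below) =====
def Claim_equal_fit_max_objects : Prop := ∀ (storage : List Int) (objects : List Int), Dom_fit_max_objects storage objects → Spec_fit_max_objects storage objects (fit_max_objects storage objects)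

-- ===== LEMMAS AND PROOFS =====

-- length of the leading run of entries ≥ obj
def pvRun (obj : Int) (l : List Int) : Nat :=
  (l.takeWhile (fun x => decide (obj ≤ x))).length

theorem pvRun_le_length (obj : Int) (l : List Int) : pvRun obj l ≤ l.length := by
  induction l with
  | nil => simp [pvRun]
  | cons x t ih =>
      simp only [pvRun, List.takeWhile] at *
      by_cases h1 : obj ≤ x
      · simp only [h1, decide_true, List.length_cons]
        omega
      · simp [h1]

theorem pvRun_anti (o o' : Int) (l : List Int) (h : o ≤ o') : pvRun o' l ≤ pvRun o l := by
  induction l with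
  | nil => simp [pvRun]
  | cons x t ih =>
      simp only [pvRun, List.takeWhile] at *
      by_cases h1 : o' ≤ x
      · have h0 : o ≤ x := le_trans h h1
        simpa [h0, h1] using ih
      · simp [h1]

theorem pvRun_lt (obj : Int) (l : List Int) : ∀ j, j < pvRun obj l → obj ≤ l.getD j 0 := by
  induction l with
  | nil => simp [pvRun]
  | cons x t ih =>
      intro j hj
      simp only [pvRun, List.takeWhile] at hj
      by_cases h1 : obj ≤ x
      · simp only [h1, decide_true] at hj
        cases j with
        | zero => simpa using h1
        | succ k =>
            simp only [List.length_cons] at hj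
            have hk : k < pvRun obj t := by simp only [pvRun]; omega
            simpa using ih k hk
      · simp [h1] at hj

theorem pvRun_at (obj : Int) (l : List Int) (h : pvRun obj l < l.length) :
    l.getD (pvRun obj l) 0 < obj := by
  induction l with
  | nil => simp at h
  | cons x t ih =>
      simp only [pvRun, List.takeWhile] at *
      by_cases h1 : obj ≤ x
      · simp only [h1, decide_true, List.length_cons] at h ⊢
        simpa using ih (by omega)
      · simpa [h1] using by omega

theorem pvPmAux_length (m : Option Int) (s : List Int) : (pvPmAux m s).length = s.length := by
  induction s generalizing m with
  | nil => simp [pvPmAux]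
  | cons x t ih => simp [pvPmAux, ih]

theorem pvPmAux_le (m : Int) (s : List Int) : ∀ y ∈ pvPmAux (some m) s, y ≤ m := by
  induction s generalizing m with
  | nil => simp [pvPmAux]
  | cons x t ih =>
      intro y hy
      simp only [pvPmAux, List.mem_cons] at hy
      rcases hy with rfl | hy
      · split <;> omega
      · have := ih (if x < m then x else m) y hy
        split at this <;> omega

theorem pvPmAux_pairwise (m : Option Int) (s : List Int) :
    (pvPmAux m s).Pairwise (fun a b => b ≤ a) := by
  induction s generalizing m with
  | nil => simp [pvPmAux]
  | cons x t ih =>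
      simp only [pvPmAux, List.pairwise_cons]
      exact ⟨fun y hy => pvPmAux_le _ t y hy, ih _⟩

theorem pvRun_pmAux (obj m : Int) (s : List Int) (h : obj ≤ m) :
    pvRun obj (pvPmAux (some m) s) = pvRun obj s := by
  induction s generalizing m with
  | nil => simp [pvPmAux]
  | cons x t ih =>
      simp only [pvPmAux, pvRun, List.takeWhile]
      by_cases h1 : obj ≤ x
      · have h2 : obj ≤ (if x < m then x else m) := by split <;> omega
        have := ih (if x < m then x else m) h2
        simp only [pvRun] at this
        simp [h1, h2, this]
      · have h2 : ¬ obj ≤ (if x < m then x else m) := by split <;> omega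
        simp [h1, h2]

theorem pvRun_pm (obj : Int) (s : List Int) :
    pvRun obj (pvPmAux none s) = pvRun obj s := by
  cases s with
  | nil => simp [pvPmAux]
  | cons x t =>
      simp only [pvPmAux, pvRun, List.takeWhile]
      by_cases h1 : obj ≤ x
      · have := pvRun_pmAux obj x t h1
        simp only [pvRun] at this
        simp [h1, this]
      · simp [h1]

-- value of A's inner while loop
theorem pvAWhile_eq (storage : List Int) (obj L : Int) (hL : L ≤ (storage.length : Int)) :
    ∀ i, i ≤ min (pvRun obj storage) L.toNat →
      pvAWhile storage obj L i = min (pvRun obj storage) L.toNat := by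
  have key : ∀ n i, min (pvRun obj storage) L.toNat - i ≤ n →
      i ≤ min (pvRun obj storage) L.toNat →
      pvAWhile storage obj L i = min (pvRun obj storage) L.toNat := by
    intro n
    induction n with
    | zero =>
        intro i hn hi
        have hieq : i = min (pvRun obj storage) L.toNat := by omega
        rw [pvAWhile]
        rw [dif_neg]
        · exact hieq
        · rintro ⟨hlt, hle⟩
          by_cases hL0 : i = L.toNat
          · omega
          · have hr : i = pvRun obj storage := by omega
            have hlen : i < storage.length := by
              have := pvRun_le_length obj storage
              omega
            have := pvRun_at obj storage (by omega)
            rw [PySem.List.pyGet?_natCast] at hle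
            rw [List.getElem?_eq_getElem hlen] at hle
            simp only [Option.getD_some] at hle
            rw [← hr] at this
            rw [List.getD_eq_getElem?_getD, List.getElem?_eq_getElem hlen] at this
            simp only [Option.getD_some] at this
            omega
    | succ n ih =>
        intro i hn hi
        by_cases hieq : i = min (pvRun obj storage) L.toNat
        · exact (by
            rw [pvAWhile, dif_neg]
            · exact hieq
            · rintro ⟨hlt, hle⟩
              by_cases hL0 : i = L.toNat
              · omega
              · have hr : i = pvRun obj storage := by omega
                have hlen : i < storage.length := by
                  have := pvRun_le_length obj storage
                  omega
                have := pvRun_at obj storage (by omega)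
                rw [PySem.List.pyGet?_natCast] at hle
                rw [List.getElem?_eq_getElem hlen] at hle
                simp only [Option.getD_some] at hle
                rw [← hr] at this
                rw [List.getD_eq_getElem?_getD, List.getElem?_eq_getElem hlen] at this
                simp only [Option.getD_some] at this
                omega)
        · have hilt : i < min (pvRun obj storage) L.toNat := by omega
          rw [pvAWhile, dif_pos]
          · exact ih (i + 1) (by omega) (by omega)
          · constructor
            · omega
            · have hlen : i < storage.length := by
                have := pvRun_le_length obj storage
                omega
              have := pvRun_lt obj storage i (by omega)
              rw [PySem.List.pyGet?_natCast, List.getElem?_eq_getElem hlen]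
              simp only [Option.getD_some]
              rw [List.getD_eq_getElem?_getD, List.getElem?_eq_getElem hlen] at this
              simpa using this
  intro i hi
  exact key (min (pvRun obj storage) L.toNat - i) i (by omega) hi

-- value of B's inner while loop
theorem pvBWhile_eq (pm : List Int) (obj : Int)
    (hpw : pm.Pairwise (fun a b => b ≤ a)) :
    ∀ p, pvRun obj pm ≤ p → p ≤ pm.length → pvBWhile pm obj p = pvRun obj pm := by
  intro p
  induction p with
  | zero =>
      intro h1 h2
      rw [pvBWhile, dif_neg]
      · omega
      · rintro ⟨h, _⟩; omega
  | succ q ih =>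
      intro h1 h2
      by_cases heq : q + 1 = pvRun obj pm
      · rw [pvBWhile, dif_neg]
        · omega
        · rintro ⟨_, hle⟩
          have hq : q < pvRun obj pm := by omega
          have := pvRun_lt obj pm q hq
          have hqlen : q < pm.length := by omega
          have hc : ((q + 1 : Nat) : Int) - 1 = ((q : Nat) : Int) := by push_cast; ring
          rw [hc, PySem.List.pyGet?_natCast, List.getElem?_eq_getElem hqlen] at hle
          simp only [Option.getD_some] at hle
          rw [List.getD_eq_getElem?_getD, List.getElem?_eq_getElem hqlen] at this
          simp only [Option.getD_some] at this
          omega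
      · have hgt : pvRun obj pm ≤ q := by omega
        rw [pvBWhile, dif_pos]
        · simpa using ih hgt (by omega)
        · refine ⟨by omega, ?_⟩
          have hqlen : q < pm.length := by omega
          have hrlt : pvRun obj pm < pm.length := by omega
          have hat := pvRun_at obj pm hrlt
          have hle : pm.getD q 0 ≤ pm.getD (pvRun obj pm) 0 := by
            rcases Nat.lt_or_ge (pvRun obj pm) q with hlt | hge
            · have := (List.pairwise_iff_getElem.mp hpw) (pvRun obj pm) q hrlt hqlen hlt
              rw [List.getD_eq_getElem?_getD, List.getElem?_eq_getElem hqlen]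
              rw [List.getD_eq_getElem?_getD, List.getElem?_eq_getElem hrlt]
              simpa using this
            · have : q = pvRun obj pm := by omega
              rw [this]
          have hq : pm.getD q 0 < obj := lt_of_le_of_lt hle hat
          have hc : ((q + 1 : Nat) : Int) - 1 = ((q : Nat) : Int) := by push_cast; ring
          rw [hc, PySem.List.pyGet?_natCast, List.getElem?_eq_getElem hqlen]
          simp only [Option.getD_some]
          rw [List.getD_eq_getElem?_getD, List.getElem?_eq_getElem hqlen] at hq
          simpa using hq

-- the two folds agree on the count component
theorem pvFold_eq (storage : List Int) :
    ∀ (os : List Int), os.Pairwise (· ≤ ·) →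
    ∀ (count L : Int) (p : Nat), L ≤ (storage.length : Int) →
      (∀ o ∈ os, pvRun o storage ≤ p) → p ≤ storage.length →
      (os.foldl
        (fun (st : Int × Int) obj =>
          let i := pvAWhile storage obj st.2 0
          (st.1 + (if (i : Int) > 0 then 1 else 0), (i : Int) - 1))
        (count, L)).1 =
      (os.foldl
        (fun (st : Int × Int × Nat) obj =>
          let p := pvBWhile (pvPmAux none storage) obj st.2.2
          let i : Int := if (p : Int) < st.2.1 then (p : Int) else if st.2.1 > 0 then st.2.1 else 0
          (st.1 + (if i > 0 then 1 else 0), i - 1, p))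
        (count, L, p)).1 := by
  intro os
  induction os with
  | nil => intro _ count L p _ _ _; simp
  | cons o t ih =>
      intro hpw count L p hL hp hplen
      have hpw' := (List.pairwise_cons.mp hpw).2
      have hhead := (List.pairwise_cons.mp hpw).1
      have hrun_pm : pvRun o (pvPmAux none storage) = pvRun o storage := pvRun_pm o storage
      have hpmlen : (pvPmAux none storage).length = storage.length := pvPmAux_length none storage
      have hb : pvBWhile (pvPmAux none storage) o p = pvRun o storage := by
        rw [pvBWhile_eq (pvPmAux none storage) o (pvPmAux_pairwise none storage) p
          (by rw [hrun_pm]; exact hp o (by simp)) (by omega), hrun_pm]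
      have ha : pvAWhile storage o L 0 = min (pvRun o storage) L.toNat :=
        pvAWhile_eq storage o L hL 0 (by omega)
      simp only [List.foldl_cons]
      have hi : ((min (pvRun o storage) L.toNat : Nat) : Int) =
          (if ((pvRun o storage : Nat) : Int) < L then ((pvRun o storage : Nat) : Int)
            else if L > 0 then L else 0) := by
        split_ifs <;> omega
      rw [ha, hb, ← hi]
      apply ih hpw'
      · have := pvRun_le_length o storage
        push_cast
        omega
      · intro o' ho'
        exact le_trans (pvRun_anti o o' storage (hhead o' ho')) (le_refl _)
      · exact le_trans (pvRun_le_length o storage) (le_refl _)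

-- ===== VERDICT (by name: the statement is the Claim_ definition above) =====
theorem fit_max_objects_spec : Claim_equal_fit_max_objects := by
  intro storage objects _
  unfold Spec_fit_max_objects fit_max_objects fit_max_objects_alt
  exact pvFold_eq storage (PySem.List.sorted objects (fun x => x) false)
    (by simpa using PySem.List.sorted_pairwise (xs := objects) (key := fun x => x))
    0 (storage.length : Int) storage.length (le_refl _)
    (fun o _ => pvRun_le_length o storage) (le_refl _)
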